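-- pv_equiv track=rewrite | github.com/Pancio-code/Fondamenti-informatica-I | laboratorio/esercizi funzioni/Lab05/esercizio11.py | funzione8
-- ===== SOURCE A (Python) =====
-- def funzione8(s):
--     c=0
--     for i in range(len(s)):
--         if s.count(s[i])>1:
--             if (s.rfind(s[i])-s.find(s[i]))>=c:
--                 c=s.rfind(s[i])-s.find(s[i])
--     return c
--     """MODIFICARE IL CONTENUTO DI QUESTA FUNZIONE PER SVOLGERE L'ESERCIZIO"""
-- ===== SOURCE B (Python) =====
-- def funzione8(s):
--     best = 0
--     first = {}
--     for i, ch in enumerate(s):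
--         if ch in first:
--             gap = i - first[ch]
--             if gap > best:
--                 best = gap
--         else:
--             first[ch] = i
--     return best
-- ===== Notes on version B (the rewrite author's own statement) =====
-- stated objective: faster
-- what changed: B makes a single left-to-right pass with a dict of each character's first-occurrence index, updating the best gap at every later occurrence, instead of A's per-index rescans with count/find/rfind.
import Mathlib
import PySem

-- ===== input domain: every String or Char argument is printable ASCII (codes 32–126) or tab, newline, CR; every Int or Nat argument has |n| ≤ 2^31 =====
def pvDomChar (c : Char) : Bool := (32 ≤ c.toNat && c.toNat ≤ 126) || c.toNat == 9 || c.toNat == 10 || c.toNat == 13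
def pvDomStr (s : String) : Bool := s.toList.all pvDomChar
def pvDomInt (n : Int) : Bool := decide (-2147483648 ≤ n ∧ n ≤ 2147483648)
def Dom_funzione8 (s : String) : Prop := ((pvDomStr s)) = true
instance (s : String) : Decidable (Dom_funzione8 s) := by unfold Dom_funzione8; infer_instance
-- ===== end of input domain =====

-- B replaces A's per-index rescans (count/find/rfind over the whole string at every position,
-- O(n^2)) by ONE left-to-right pass keeping a dict of each character's first-occurrence index
-- and updating the best gap at every later occurrence (objective: faster, O(n)).

-- ===== PORT A =====
def funzione8 (s : String) : Int :=
  (PySem.List.pyRange 0 (PySem.Str.len s) 1).foldl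
    (fun c i =>
      let ch := PySem.List.pyGetD s.toList i ' '
      if PySem.Str.count s (String.ofList [ch]) > 1 then
        if PySem.Str.rfind s (String.ofList [ch]) - PySem.Str.find s (String.ofList [ch]) ≥ c then
          PySem.Str.rfind s (String.ofList [ch]) - PySem.Str.find s (String.ofList [ch])
        else c
      else c) 0

-- ===== PORT B =====
-- one pass over enumerate(s); state = (first : dict of first-occurrence index, best)
def funzione8_alt (s : String) : Int :=
  ((PySem.List.enumerate s.toList 0).foldl
    (fun st p =>
      if st.1.contains p.2 then
        if p.1 - st.1.getD p.2 0 > st.2 then (st.1, p.1 - st.1.getD p.2 0) else st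
      else (st.1.insert p.2 p.1, st.2))
    ((PySem.Dict.empty : PySem.Dict Char Int), (0 : Int))).2

-- ===== PRECONDITION & SPEC =====
def Spec_funzione8 (s : String) (out : Int) : Prop := out = funzione8_alt s
instance (s : String) (out : Int) : Decidable (Spec_funzione8 s out) := by unfold Spec_funzione8; infer_instance

-- ===== CLAIM (what is proved, stated in full; the proofs are below) =====
def Claim_equal_funzione8 : Prop := ∀ (s : String), Dom_funzione8 s → Spec_funzione8 s (funzione8 s)

-- ===== LEMMAS AND PROOFS =====

-- [c] is a prefix of l.drop i exactly when position i of l holds c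
theorem pv_prefix_singleton (l : List Char) (c : Char) (i : Nat) :
    List.isPrefixOf [c] (l.drop i) = true ↔ ∃ h : i < l.length, l[i] = c := by
  constructor
  · intro h
    by_cases hi : i < l.length
    · rw [List.drop_eq_getElem_cons hi] at h
      simp [List.isPrefixOf] at h
      exact ⟨hi, h.symm⟩
    · rw [List.drop_eq_nil_of_le (le_of_not_gt hi)] at h
      simp [List.isPrefixOf] at h
  · rintro ⟨hi, hc⟩
    rw [List.drop_eq_getElem_cons hi, hc]
    simp [List.isPrefixOf]

-- s.find of a single character present in the string is List.idxOf
theorem pv_find_go_singleton (c : Char) (l : List Char) (k : Nat) (h : c ∈ l) :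
    PySem.Chars.find.go [c] l k = ((k + l.idxOf c : Nat) : Int) := by
  induction l generalizing k with
  | nil => cases h
  | cons x t ih =>
    have hstep : PySem.Chars.find.go [c] (x :: t) k
        = if List.isPrefixOf [c] (x :: t) then (k : Int) else PySem.Chars.find.go [c] t (k+1) := rfl
    by_cases hx : x = c
    · subst hx
      simp [hstep, List.isPrefixOf, List.idxOf_cons_eq t rfl]
    · have hc : c ∈ t := by
        rcases List.mem_cons.mp h with h' | h'
        · exact absurd h'.symm hx
        · exact h'
      rw [hstep]
      have hpre : List.isPrefixOf [c] (x :: t) = false := by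
        simp [List.isPrefixOf]
        exact fun he => hx he.symm
      rw [hpre]
      simp only [Bool.false_eq_true, if_false]
      rw [ih (k+1) hc, List.idxOf_cons_ne t hx]
      push_cast
      ring

theorem pv_find_singleton (l : List Char) (c : Char) (h : c ∈ l) :
    PySem.Chars.find l [c] = ((l.idxOf c : Nat) : Int) := by
  unfold PySem.Chars.find
  rw [pv_find_go_singleton c l 0 h]
  simp

-- s.rfind of a single character: the result of the backward scan is the LAST occurrence
theorem pv_rfind_go_spec (l : List Char) (c : Char) (j : Nat) :
    (PySem.Chars.rfind.go l [c] j = -1 ∧ ∀ i, (hi : i < l.length) → i ≤ j → l[i] ≠ c)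
    ∨ (∃ r, ∃ hr : r < l.length, PySem.Chars.rfind.go l [c] j = (r : Int) ∧ r ≤ j ∧ l[r] = c
        ∧ ∀ i, (hi : i < l.length) → r < i → i ≤ j → l[i] ≠ c) := by
  induction j with
  | zero =>
    have hstep : PySem.Chars.rfind.go l [c] 0
        = if List.isPrefixOf [c] l then (0 : Int) else -1 := rfl
    by_cases hp : List.isPrefixOf [c] (l.drop 0) = true
    · obtain ⟨h0, hc0⟩ := (pv_prefix_singleton l c 0).mp hp
      right
      refine ⟨0, h0, ?_, le_rfl, hc0, fun i hi h1 h2 => by omega⟩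
      rw [hstep, if_pos (by simpa using hp)]
      simp
    · left
      constructor
      · rw [hstep, if_neg (by simpa using hp)]
      · intro i hi hle
        have hi0 : i = 0 := Nat.le_zero.mp hle
        subst hi0
        intro he
        exact hp ((pv_prefix_singleton l c 0).mpr ⟨hi, he⟩)
  | succ j ih =>
    have hstep : PySem.Chars.rfind.go l [c] (j+1)
        = if List.isPrefixOf [c] (l.drop (j+1)) then ((j : Int)+1) else PySem.Chars.rfind.go l [c] j := rfl
    by_cases hp : List.isPrefixOf [c] (l.drop (j+1)) = true
    · obtain ⟨h1, hc1⟩ := (pv_prefix_singleton l c (j+1)).mp hp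
      right
      refine ⟨j+1, h1, ?_, le_rfl, hc1, fun i hi hgt hle => by omega⟩
      rw [hstep, if_pos hp]
      push_cast
      ring
    · have hnot : ∀ (hi : j+1 < l.length), l[j+1] ≠ c := fun hi he =>
        hp ((pv_prefix_singleton l c (j+1)).mpr ⟨hi, he⟩)
      rcases ih with ⟨hval, hnone⟩ | ⟨r, hr, hval, hle, hrc, hmax⟩
      · left
        constructor
        · rw [hstep, if_neg hp]; exact hval
        · intro i hi hile
          rcases Nat.lt_or_ge i (j+1) with h' | h'
          · exact hnone i hi (by omega)
          · have : i = j+1 := by omega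
            subst this
            exact hnot hi
      · right
        refine ⟨r, hr, ?_, by omega, hrc, ?_⟩
        · rw [hstep, if_neg hp]; exact hval
        · intro i hi hgt hile
          rcases Nat.lt_or_ge i (j+1) with h' | h'
          · exact hmax i hi hgt (by omega)
          · have : i = j+1 := by omega
            subst this
            exact hnot hi

theorem pv_rfind_singleton (l : List Char) (c : Char) (h : c ∈ l) :
    ∃ r, ∃ hr : r < l.length, PySem.Chars.rfind l [c] = (r : Int) ∧ l[r] = c
      ∧ ∀ i, (hi : i < l.length) → l[i] = c → i ≤ r := by
  unfold PySem.Chars.rfind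
  rcases pv_rfind_go_spec l c l.length with ⟨_, hnone⟩ | ⟨r, hr, hval, _, hrc, hmax⟩
  · obtain ⟨i, hi, hic⟩ := List.mem_iff_getElem.mp h
    exact absurd hic (hnone i hi (le_of_lt hi))
  · refine ⟨r, hr, hval, hrc, fun i hi hic => ?_⟩
    by_contra hgt
    exact hmax i hi (by omega) (le_of_lt hi) hic

-- s.count of a single character is List.count
theorem pv_count_go_singleton (c : Char) (fuel : Nat) (l : List Char) (acc : Nat)
    (h : l.length ≤ fuel) :
    PySem.Chars.count.go [c] fuel l acc = acc + l.count c := by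
  induction fuel generalizing l acc with
  | zero =>
    have : l = [] := List.eq_nil_of_length_eq_zero (Nat.le_zero.mp h)
    subst this
    rfl
  | succ f ih =>
    cases l with
    | nil => rfl
    | cons x t =>
      have hstep : PySem.Chars.count.go [c] (f+1) (x :: t) acc
          = if List.isPrefixOf [c] (x :: t) then PySem.Chars.count.go [c] f t (acc+1)
            else PySem.Chars.count.go [c] f t acc := rfl
      have hlen : t.length ≤ f := by simpa using h
      by_cases hx : x = c
      · subst hx
        rw [hstep, if_pos (by simp [List.isPrefixOf]), ih t (acc+1) hlen]
        simp
        omega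
      · rw [hstep, if_neg (by simp [List.isPrefixOf]; exact fun he => hx he.symm),
          ih t acc hlen]
        simp [List.count_cons]
        intro he
        exact absurd he hx

theorem pv_count_singleton (l : List Char) (c : Char) :
    PySem.Chars.count l [c] = l.count c := by
  unfold PySem.Chars.count
  rw [if_neg (by simp)]
  rw [pv_count_go_singleton c l.length l 0 le_rfl]
  simp

-- idxOf is the FIRST occurrence
theorem pv_idxOf_le (l : List Char) (c : Char) (j : Nat) (hj : j < l.length) (he : l[j] = c) :
    l.idxOf c ≤ j := by
  have hmem : c ∈ l := he ▸ List.getElem_mem hj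
  have htake : c ∈ l.take (j+1) := List.mem_take_iff_getElem.mpr ⟨j, by omega, he⟩
  have := (List.mem_take_iff_idxOf_lt hmem).mp htake
  omega

theorem pv_idxOf_first (l : List Char) (c : Char) (k : Nat) (hk : k < l.length) (he : l[k] = c)
    (hn : c ∉ l.take k) : l.idxOf c = k := by
  have h1 := pv_idxOf_le l c k hk he
  have hmem : c ∈ l := he ▸ List.getElem_mem hk
  have h2 : ¬ l.idxOf c < k := fun hlt => hn ((List.mem_take_iff_idxOf_lt hmem).mpr hlt)
  omega

-- two distinct occurrences force count > 1
theorem pv_two_le_count (l : List Char) (c : Char) (i j : Nat) (hi : i < l.length)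
    (hj : j < l.length) (hij : i < j) (hci : l[i] = c) (hcj : l[j] = c) : 1 < l.count c := by
  have hcount : l.count c = (l.take (i+1)).count c + (l.drop (i+1)).count c := by
    conv_lhs => rw [← List.take_append_drop (i+1) l]
    exact List.count_append
  have h1 : c ∈ l.take (i+1) := List.mem_take_iff_getElem.mpr ⟨i, by omega, hci⟩
  have h2 : c ∈ l.drop (i+1) := by
    have hjlen : j - (i+1) < (l.drop (i+1)).length := by simp; omega
    have : (l.drop (i+1))[j - (i+1)] = c := by
      rw [List.getElem_drop]
      have : i + 1 + (j - (i+1)) = j := by omega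
      simp_rw [this]
      exact hcj
    exact this ▸ List.getElem_mem hjlen
  have p1 := List.count_pos_iff.mpr h1
  have p2 := List.count_pos_iff.mpr h2
  omega

theorem pv_count_le_one_unique (l : List Char) (c : Char) (i j : Nat) (hi : i < l.length)
    (hj : j < l.length) (hci : l[i] = c) (hcj : l[j] = c) (hcount : l.count c ≤ 1) : i = j := by
  rcases lt_trichotomy i j with h | h | h
  · exact absurd hcount (by have := pv_two_le_count l c i j hi hj h hci hcj; omega)
  · exact h
  · exact absurd hcount (by have := pv_two_le_count l c j i hj hi h hcj hci; omega)

-- a fold of max is bounded by any common upper bound of the seed and the elements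
theorem pv_foldl_max_le (t : List Int) (a c : Int) (ha : a ≤ c) (ht : ∀ y ∈ t, y ≤ c) :
    t.foldl max a ≤ c := by
  induction t generalizing a with
  | nil => simpa using ha
  | cons x xs ih =>
    simp only [List.foldl_cons]
    exact ih (max a x) (max_le ha (ht x (by simp))) (fun y hy => ht y (by simp [hy]))

-- a guarded max-fold is the plain max-fold over the filtered list
theorem pv_foldl_guard (P : Char → Bool) (v : Char → Int) (t : List Char) (a : Int) :
    t.foldl (fun c ch => if P ch then max c (v ch) else c) a
      = ((t.filter P).map v).foldl max a := by
  induction t generalizing a with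
  | nil => rfl
  | cons x xs ih =>
    by_cases hx : P x = true <;> simp [hx, ih]

-- A's step is the guarded max step
theorem pv_stepA (P : Char → Bool) (v : Char → Int) (c : Int) (ch : Char) :
    (if P ch then (if v ch ≥ c then v ch else c) else c)
      = (if P ch then max c (v ch) else c) := by
  by_cases h : P ch = true <;> simp [h, max_def]

-- B's 'if gap > best' update is a max
theorem pv_if_max (a b : Int) : (if b > a then b else a) = max a b := by
  simp [max_def]
  split_ifs <;> omega

-- invariant of B's single pass: once the dict holds the first-occurrence index (w.r.t. the
-- full string) of exactly the characters of the processed prefix, the remaining fold is a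
-- plain max-fold of the gaps i - idxOf(s[i])
theorem pv_B_loop (l : List Char) (k : Nat) (d : PySem.Dict Char Int) (b : Int)
    (hk : k ≤ l.length) (hb : 0 ≤ b)
    (hd : ∀ ch : Char, d.get? ch = if ch ∈ l.take k then some ((l.idxOf ch : Nat) : Int) else none) :
    ((PySem.List.enumerate (l.drop k) (k : Int)).foldl
      (fun st p =>
        if st.1.contains p.2 then
          if p.1 - st.1.getD p.2 0 > st.2 then (st.1, p.1 - st.1.getD p.2 0) else st
        else (st.1.insert p.2 p.1, st.2)) (d, b)).2
    = (PySem.List.enumerate (l.drop k) (k : Int)).foldl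
        (fun acc p => max acc (p.1 - ((l.idxOf p.2 : Nat) : Int))) b := by
  obtain ⟨n, hn⟩ : ∃ n, l.length - k = n := ⟨_, rfl⟩
  induction n generalizing k d b with
  | zero =>
    have hke : l.length ≤ k := by omega
    rw [List.drop_eq_nil_of_le hke]
    rfl
  | succ n ih =>
    have hk' : k < l.length := by omega
    rw [List.drop_eq_getElem_cons hk', PySem.List.enumerate_cons]
    simp only [List.foldl_cons]
    have hcast : (k : Int) + 1 = ((k+1 : Nat) : Int) := by push_cast; ring
    have htake : l.take (k+1) = l.take k ++ [l[k]] := by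
      rw [List.take_add_one, List.getElem?_eq_getElem hk']
      rfl
    by_cases hmem : l[k] ∈ l.take k
    · -- seen before: update best, dict unchanged
      have hget : d.get? l[k] = some ((l.idxOf l[k] : Nat) : Int) := by
        rw [hd]; simp [hmem]
      have hcont : d.contains l[k] = true := by
        rw [PySem.Dict.contains_eq_isSome_get?, hget]; rfl
      have hgd : d.getD l[k] 0 = ((l.idxOf l[k] : Nat) : Int) := by
        rw [PySem.Dict.getD_eq_get?_getD, hget]; rfl
      simp only [hcont, if_true, hgd]
      have hstep :
          (if (k : Int) - ((l.idxOf l[k] : Nat) : Int) > b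
            then (d, (k : Int) - ((l.idxOf l[k] : Nat) : Int)) else (d, b))
          = (d, max b ((k : Int) - ((l.idxOf l[k] : Nat) : Int))) := by
        rw [← pv_if_max b ((k : Int) - ((l.idxOf l[k] : Nat) : Int))]
        split_ifs <;> rfl
      rw [hstep, hcast]
      refine ih (k+1) d (max b ((k : Int) - ((l.idxOf l[k] : Nat) : Int)))
        (by omega) (le_trans hb (le_max_left _ _)) ?_ (by omega)
      intro ch
      have hiff : (ch ∈ l.take (k+1)) ↔ (ch ∈ l.take k) := by
        rw [htake]
        simp only [List.mem_append, List.mem_singleton]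
        constructor
        · rintro (h' | rfl)
          · exact h'
          · exact hmem
        · exact Or.inl
      simp only [hiff]
      exact hd ch
    · -- first occurrence: record it; the gap would be 0, best unchanged
      have hget : d.get? l[k] = none := by rw [hd]; simp [hmem]
      have hcont : d.contains l[k] = false := by
        rw [PySem.Dict.contains_eq_isSome_get?, hget]; rfl
      have hidx : l.idxOf l[k] = k := pv_idxOf_first l l[k] k hk' rfl hmem
      simp only [hcont, Bool.false_eq_true, if_false]
      have hzero : max b ((k : Int) - ((l.idxOf l[k] : Nat) : Int)) = b := by
        rw [hidx]
        simp
        omega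
      rw [hzero, hcast]
      refine ih (k+1) (d.insert l[k] (k : Int)) b (by omega) hb ?_ (by omega)
      intro ch
      by_cases hch : ch = l[k]
      · subst hch
        rw [PySem.Dict.get?_insert_self, hidx]
        have hin : l[k] ∈ l.take (k+1) := by
          rw [htake]
          exact List.mem_append_right _ (by simp)
        simp [hin]
      · rw [PySem.Dict.get?_insert_of_ne d ((k : Nat) : Int) hch, hd ch]
        have hiff : (ch ∈ l.take (k+1)) ↔ (ch ∈ l.take k) := by
          rw [htake]
          simp only [List.mem_append, List.mem_singleton]
          constructor
          · rintro (h' | h')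
            · exact h'
            · exact absurd h' hch
          · exact Or.inl
        simp only [hiff]

-- ===== VERDICT (by name: the statement is the Claim_ definition above) =====
theorem funzione8_spec : Claim_equal_funzione8 := by
  intro s _
  unfold Spec_funzione8 funzione8 funzione8_alt
  set l := s.toList with hl
  set P : Char → Bool := fun ch => decide (PySem.Str.count s (String.ofList [ch]) > 1) with hP
  set v : Char → Int :=
    fun ch => PySem.Str.rfind s (String.ofList [ch]) - PySem.Str.find s (String.ofList [ch]) with hv
  -- A reduces to a max-fold over the characters that pass the count>1 guard
  have hA : (PySem.List.pyRange 0 (PySem.Str.len s) 1).foldl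
      (fun c i =>
        let ch := PySem.List.pyGetD s.toList i ' '
        if PySem.Str.count s (String.ofList [ch]) > 1 then
          if PySem.Str.rfind s (String.ofList [ch]) - PySem.Str.find s (String.ofList [ch]) ≥ c then
            PySem.Str.rfind s (String.ofList [ch]) - PySem.Str.find s (String.ofList [ch])
          else c
        else c) 0
      = ((l.filter P).map v).foldl max 0 := by
    rw [PySem.Str.len_eq,
      PySem.List.foldl_pyRange_zero_pyGetD' s.toList ' '
        (fun c ch =>
          if PySem.Str.count s (String.ofList [ch]) > 1 then
            if PySem.Str.rfind s (String.ofList [ch]) - PySem.Str.find s (String.ofList [ch]) ≥ c then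
              PySem.Str.rfind s (String.ofList [ch]) - PySem.Str.find s (String.ofList [ch])
            else c
          else c) 0]
    rw [← pv_foldl_guard P v l 0]
    congr 1
    funext c ch
    simpa [hP, hv] using pv_stepA P v c ch
  -- B reduces to a max-fold of the gaps i - idxOf(s[i])
  have hB : ((PySem.List.enumerate s.toList 0).foldl
      (fun st p =>
        if st.1.contains p.2 then
          if p.1 - st.1.getD p.2 0 > st.2 then (st.1, p.1 - st.1.getD p.2 0) else st
        else (st.1.insert p.2 p.1, st.2))
      ((PySem.Dict.empty : PySem.Dict Char Int), (0 : Int))).2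
      = ((PySem.List.enumerate l 0).map (fun p => p.1 - ((l.idxOf p.2 : Nat) : Int))).foldl max 0 := by
    have h0 := pv_B_loop l 0 PySem.Dict.empty 0 (Nat.zero_le _) le_rfl
      (fun ch => by rw [PySem.Dict.get?_empty]; simp)
    simp only [List.drop_zero, Nat.cast_zero] at h0
    rw [← hl, h0, List.foldl_map]
  rw [hA, hB]
  -- the two max-folds are equal: antisymmetry via membership arguments
  have hcount : ∀ ch : Char, P ch = true ↔ 1 < l.count ch := by
    intro ch
    rw [hP]
    simp only [decide_eq_true_eq, PySem.Str.count_eq, String.toList_ofList, ← hl,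
      pv_count_singleton]
  have hvA : ∀ ch ∈ l, ∃ r, ∃ hr : r < l.length, l[r] = ch ∧
      v ch = (r : Int) - ((l.idxOf ch : Nat) : Int) ∧
      ∀ i, (hi : i < l.length) → l[i] = ch → i ≤ r := by
    intro ch hch
    obtain ⟨r, hr, hval, hrc, hmax⟩ := pv_rfind_singleton l ch hch
    refine ⟨r, hr, hrc, ?_, hmax⟩
    rw [hv]
    simp only [PySem.Str.rfind_eq, PySem.Str.find_eq, String.toList_ofList, ← hl]
    rw [hval, pv_find_singleton l ch hch]
  apply le_antisymm
  · -- A's fold ≤ B's fold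
    apply pv_foldl_max_le
    · exact (PySem.List.le_foldl_max _ 0).1
    · intro y hy
      obtain ⟨ch, hchf, rfl⟩ := List.mem_map.mp hy
      obtain ⟨hchl, _⟩ := List.mem_filter.mp hchf
      obtain ⟨r, hr, hrc, hveq, _⟩ := hvA ch hchl
      refine le_trans (le_of_eq hveq) ((PySem.List.le_foldl_max _ 0).2 _ ?_)
      refine List.mem_map.mpr ⟨((r : Int), ch), ?_, by simp⟩
      rw [PySem.List.mem_enumerate_iff]
      exact ⟨r, hr, by simp [hrc]⟩
  · -- B's fold ≤ A's fold
    apply pv_foldl_max_le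
    · exact (PySem.List.le_foldl_max _ 0).1
    · intro y hy
      obtain ⟨p, hpe, rfl⟩ := List.mem_map.mp hy
      obtain ⟨k, hk, rfl⟩ := (PySem.List.mem_enumerate_iff l 0 p).mp hpe
      simp only [zero_add]
      set ch := l[k] with hch
      have hchl : ch ∈ l := List.getElem_mem hk
      by_cases hc1 : 1 < l.count ch
      · obtain ⟨r, hr, hrc, hveq, hrmax⟩ := hvA ch hchl
        have hkr : k ≤ r := hrmax k hk rfl
        have hidxle : l.idxOf ch ≤ k := pv_idxOf_le l ch k hk rfl
        refine le_trans (by rw [hveq]; omega : ((k : Nat) : Int) - ((l.idxOf ch : Nat) : Int) ≤ v ch)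
          ((PySem.List.le_foldl_max _ 0).2 _ ?_)
        exact List.mem_map.mpr ⟨ch, List.mem_filter.mpr ⟨hchl, (hcount ch).mpr hc1⟩, rfl⟩
      · -- unique occurrence: the gap is 0
        have hidxlt : l.idxOf ch < l.length := List.idxOf_lt_length_of_mem hchl
        have hidxc : l[l.idxOf ch] = ch := List.getElem_idxOf hidxlt
        have : k = l.idxOf ch :=
          pv_count_le_one_unique l ch k (l.idxOf ch) hk hidxlt rfl hidxc (by omega)
        rw [← this]
        have : ((k : Nat) : Int) - ((k : Nat) : Int) = 0 := by ring
        rw [this]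
        exact (PySem.List.le_foldl_max _ 0).1
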